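-- pv_equiv track=rewrite | github.com/jramaswami/Binary_Search_Python | number_of_sublists_with_sum_of_target.py | solve
-- ===== SOURCE A (Python) =====
-- from collections import defaultdict
--
-- def solve(nums, target):
--     # Keep track of previous sums and the number of times we have seen them.
--     prev_sums = defaultdict(int)
--     prev_sums[0] = 1
--     soln = 0
--
--     curr_sum = 0
--     for n in nums:
--         curr_sum += n
--         # Count the number of sublists ending with end that sum to the
--         # target value.  To do this see how many times curr_sum - target
--         # has been seen because curr_sum - target_sum is the sum of a
--         # sublist ending at the current num.  See below for illustration.
--         # [x1, x2, x3, x4, x5, x6, x7, x8, ...]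
--         # -----------curr sum------------
--         # ---prev_sum----
--         #                ---target sum---
--         soln += prev_sums.get(curr_sum - target, 0)
--         prev_sums[curr_sum] += 1
--     return soln
-- ===== SOURCE B (Python) =====
-- def solve(nums, target):
--     total = 0
--     suffix = nums
--     while suffix:
--         s = 0
--         for x in suffix:
--             s += x
--             if s == target:
--                 total += 1
--         suffix = suffix[1:]
--     return total
-- ===== Notes on version B (the rewrite author's own statement) =====
-- stated objective: simpler
-- what changed: Replaced the prefix-sum hashmap with a plain nested scan: for each suffix, accumulate a running sum and count hits of target; no dictionary is maintained.
import Mathlib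
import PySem

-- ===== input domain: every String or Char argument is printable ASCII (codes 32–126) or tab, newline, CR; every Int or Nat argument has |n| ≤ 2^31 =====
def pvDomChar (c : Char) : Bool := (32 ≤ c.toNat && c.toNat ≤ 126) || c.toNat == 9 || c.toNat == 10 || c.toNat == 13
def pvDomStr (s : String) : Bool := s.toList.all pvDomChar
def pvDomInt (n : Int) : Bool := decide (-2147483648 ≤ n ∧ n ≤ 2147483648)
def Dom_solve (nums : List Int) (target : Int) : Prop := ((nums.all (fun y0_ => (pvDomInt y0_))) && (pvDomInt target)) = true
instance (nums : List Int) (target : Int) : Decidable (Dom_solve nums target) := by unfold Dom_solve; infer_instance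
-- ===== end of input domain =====

-- B replaces A's prefix-sum hashmap with a plain nested scan over suffixes (simpler, no dictionary; O(n^2) vs A's O(n)).


-- ===== PORT A =====
-- one iteration of A's for-loop; state = (prev_sums, soln, curr_sum)
def solveStep (target : Int) (st : PySem.Dict Int Int × Int × Int) (n : Int) :
    PySem.Dict Int Int × Int × Int :=
  let c := st.2.2 + n
  let soln := st.2.1 + st.1.getD (c - target) 0
  let d := st.1.modify c 0 (· + 1)        -- prev_sums[curr_sum] += 1 (defaultdict(int))
  (d, soln, c)

def solve (nums : List Int) (target : Int) : Int :=
  (nums.foldl (solveStep target) ((PySem.Dict.empty.insert 0 1), 0, 0)).2.1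

-- ===== PORT B =====
-- inner for-loop of Source B: state = (s, total)
def innerStep (target : Int) (st : Int × Int) (x : Int) : Int × Int :=
  let s := st.1 + x
  (s, if s = target then st.2 + 1 else st.2)

-- the while-loop over successive suffixes
def solveAltLoop (target : Int) : List Int → Int → Int
  | [], total => total
  | x :: rest, total => solveAltLoop target rest (((x :: rest).foldl (innerStep target) (0, total)).2)

def solve_alt (nums : List Int) (target : Int) : Int :=
  solveAltLoop target nums 0

-- ===== PRECONDITION & SPEC =====
def Spec_solve (nums : List Int) (target : Int) (out : Int) : Prop := out = solve_alt nums target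
instance (nums : List Int) (target : Int) (out : Int) : Decidable (Spec_solve nums target out) := by unfold Spec_solve; infer_instance

-- ===== CLAIM (what is proved, stated in full; the proofs are below) =====
def Claim_equal_solve : Prop := ∀ (nums : List Int) (target : Int), Dom_solve nums target → Spec_solve nums target (solve nums target)

-- ===== LEMMAS AND PROOFS =====

-- sums of the nonempty prefixes of xs, each offset by c
def S : List Int → Int → List Int
  | [], _ => []
  | x :: xs, c => (c + x) :: S xs (c + x)

-- sums of all nonempty contiguous sublists, grouped by start position
def subSums : List Int → List Int
  | [] => []
  | x :: xs => S (x :: xs) 0 ++ subSums xs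

lemma cnt_cons (n t : Int) (l : List Int) : (n :: l).count t = l.count t + if n = t then 1 else 0 := by
  simp [List.count_cons]

lemma S_snoc (ys : List Int) (n : Int) : ∀ c, S (ys ++ [n]) c = S ys c ++ [c + ys.sum + n] := by
  induction ys with
  | nil => intro c; simp [S]
  | cons x ys ih =>
      intro c
      have h : c + (x :: ys).sum + n = (c + x) + ys.sum + n := by simp only [List.sum_cons]; ring
      simp only [List.cons_append, S, ih (c + x), h]

lemma count_S_shift (xs : List Int) : ∀ (v c₁ c₂ : Int),
    (S xs c₁).count (v + c₁) = (S xs c₂).count (v + c₂) := by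
  induction xs with
  | nil => intro v c₁ c₂; simp [S]
  | cons x xs ih =>
      intro v c₁ c₂
      simp only [S, cnt_cons]
      have h1 : v + c₁ = (v - x) + (c₁ + x) := by ring
      have h2 : (v - x) + (c₂ + x) = v + c₂ := by ring
      rw [h1, ih (v - x) (c₁ + x) (c₂ + x), h2]
      split_ifs <;> omega

lemma count_subSums_snoc (ys : List Int) (n t : Int) :
    (subSums (ys ++ [n])).count t
      = (subSums ys).count t + (0 :: S ys 0).count (ys.sum + n - t) := by
  induction ys with
  | nil =>
      simp only [List.nil_append, subSums, S, List.append_nil, List.count_nil, List.sum_nil,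
        cnt_cons, Nat.zero_add]
      split_ifs <;> omega
  | cons x ys ih =>
      have hS : S (x :: (ys ++ [n])) 0 = S (x :: ys) 0 ++ [0 + (x :: ys).sum + n] := by
        rw [show x :: (ys ++ [n]) = (x :: ys) ++ [n] from rfl, S_snoc]
      have hshift : (S ys (0 + x)).count (x + ys.sum + n - t) = (S ys 0).count (ys.sum + n - t) := by
        have h1 : x + ys.sum + n - t = (ys.sum + n - t) + (0 + x) := by ring
        rw [h1, count_S_shift ys (ys.sum + n - t) (0 + x) 0, add_zero]
      rw [List.cons_append]
      simp only [subSums, List.count_append, hS]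
      rw [ih]
      simp only [cnt_cons, List.sum_cons,
        show S (x :: ys) 0 = (0 + x) :: S ys (0 + x) from rfl]
      rw [hshift]
      simp only [List.count_nil]
      split_ifs <;> omega

lemma A_loop (t : Int) (rest : List Int) : ∀ (ys : List Int) (d : PySem.Dict Int Int) (soln c : Int),
    (∀ v, d.getD v 0 = ((0 :: S ys 0).count v : Int)) → c = ys.sum →
    soln = ((subSums ys).count t : Int) →
    (rest.foldl (solveStep t) (d, soln, c)).2.1 = ((subSums (ys ++ rest)).count t : Int) := by
  induction rest with
  | nil => intro ys d soln c _ _ hsoln; simpa using hsoln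
  | cons n rest ih =>
      intro ys d soln c hd hc hsoln
      rw [List.foldl_cons,
        show solveStep t (d, soln, c) n
          = (d.modify (c + n) 0 (· + 1), soln + d.getD (c + n - t) 0, c + n) from rfl,
        show ys ++ n :: rest = (ys ++ [n]) ++ rest by simp]
      subst hc
      apply ih (ys ++ [n])
      · intro v
        have hlist : (0 :: S (ys ++ [n]) 0) = 0 :: (S ys 0 ++ [0 + ys.sum + n]) := by
          rw [S_snoc]
        rw [PySem.Dict.getD_modify, hlist, hd v, hd (ys.sum + n)]
        rcases eq_or_ne v (ys.sum + n) with hv | hv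
        · subst hv
          rw [if_pos rfl]
          simp only [cnt_cons, List.count_append, List.count_nil]
          split_ifs <;> push_cast <;> omega
        · rw [if_neg hv]
          simp only [cnt_cons, List.count_append, List.count_nil]
          split_ifs <;> push_cast <;> omega
      · rw [List.sum_append, List.sum_cons, List.sum_nil]; ring
      · rw [hsoln, hd (ys.sum + n - t), count_subSums_snoc]
        push_cast
        ring

lemma solve_eq_count (nums : List Int) (t : Int) :
    solve nums t = ((subSums nums).count t : Int) := by
  unfold solve
  have := A_loop t nums [] (PySem.Dict.empty.insert 0 1) 0 0 ?_ rfl rfl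
  · simpa using this
  · intro v
    rw [PySem.Dict.getD_insert]
    rcases eq_or_ne v 0 with h | h
    · simp [h, S]
    · simp [h, S, PySem.Dict.getD_empty, Ne.symm h]

lemma inner_eq (t : Int) (xs : List Int) : ∀ (s acc : Int),
    (xs.foldl (innerStep t) (s, acc)).2 = acc + ((S xs s).count t : Int) := by
  induction xs with
  | nil => intro s acc; simp [S]
  | cons x xs ih =>
      intro s acc
      have hstep : innerStep t (s, acc) x = (s + x, if s + x = t then acc + 1 else acc) := rfl
      rw [List.foldl_cons, hstep]
      simp only [S, List.count_cons, ih]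
      rcases eq_or_ne (s + x) t with h | h
      · simp [h]; ring
      · simp [h, beq_iff_eq]

lemma alt_loop_eq (t : Int) (xs : List Int) : ∀ (total : Int),
    solveAltLoop t xs total = total + ((subSums xs).count t : Int) := by
  induction xs with
  | nil => intro total; simp [solveAltLoop, subSums]
  | cons x xs ih =>
      intro total
      rw [solveAltLoop, inner_eq, ih]
      simp only [subSums, List.count_append]
      push_cast
      ring

-- ===== VERDICT (by name: the statement is the Claim_ definition above) =====
theorem solve_spec : Claim_equal_solve := by
  intro nums target _
  unfold Spec_solve
  rw [solve_eq_count, solve_alt, alt_loop_eq]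
  ring
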